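-- pv_equiv track=rewrite | github.com/Djerys/logy | calculation.py | _glued
-- ===== SOURCE A (Python) =====
-- from collections import OrderedDict
--
-- def _glued(vector1, vector2):
--     new_vector = OrderedDict()
--     difference_count = 0
--     for variable, _ in zip(vector1, vector2):
--         if vector1[variable] != vector2[variable]:
--             new_vector[variable] = '-'
--             difference_count += 1
--         else:
--             new_vector[variable] = vector1[variable]
--     if difference_count == 1:
--         return new_vector
--     return None
-- ===== SOURCE B (Python) =====
-- from collections import OrderedDict
--
--
-- def _glued(vector1, vector2):
--     keys = [k for k, _ in zip(vector1, vector2)]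
--
--     def go(i, seen):
--         # Pairs for keys[i:] if the total number of differences ends up exactly 1,
--         # else None; aborts as soon as a second difference is found.
--         if i == len(keys):
--             return [] if seen else None
--         k = keys[i]
--         if vector1[k] != vector2[k]:
--             if seen:
--                 return None
--             rest = go(i + 1, True)
--             return None if rest is None else [(k, '-')] + rest
--         rest = go(i + 1, seen)
--         return None if rest is None else [(k, vector1[k])] + rest
--
--     pairs = go(0, False)
--     return None if pairs is None else OrderedDict(pairs)
-- ===== Notes on version B (the rewrite author's own statement) =====
-- stated objective: alternative
-- what changed: A makes one loop that builds an OrderedDict while incrementing a difference counter and tests the counter afterwards; B is a recursive descent over the key list carrying a seen-a-difference flag, which aborts with None as soon as a second difference appears (and at the end if none appeared), builds the (key, value) pair list back-to-front through the recursion with no dict and no counter, and converts to an OrderedDict only on success.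
import Mathlib
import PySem

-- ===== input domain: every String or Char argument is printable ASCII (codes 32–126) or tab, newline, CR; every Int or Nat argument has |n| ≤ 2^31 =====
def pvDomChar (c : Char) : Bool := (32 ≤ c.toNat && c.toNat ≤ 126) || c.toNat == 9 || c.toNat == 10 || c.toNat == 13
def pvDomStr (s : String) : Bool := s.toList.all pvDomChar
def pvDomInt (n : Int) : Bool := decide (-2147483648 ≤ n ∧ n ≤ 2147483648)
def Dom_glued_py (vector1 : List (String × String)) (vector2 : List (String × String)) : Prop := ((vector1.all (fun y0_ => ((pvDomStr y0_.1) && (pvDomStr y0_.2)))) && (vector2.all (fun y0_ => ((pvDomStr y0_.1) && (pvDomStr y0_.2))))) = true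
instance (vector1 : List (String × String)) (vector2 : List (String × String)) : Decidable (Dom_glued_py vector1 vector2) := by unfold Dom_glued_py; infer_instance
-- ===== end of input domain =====

-- B replaces A's single loop (dict built key by key + a difference counter, checked at the end)
-- by a recursive descent over the keys with a seen-a-difference flag that aborts on a second
-- difference and builds the pair list back-to-front; same cost, different decomposition.
-- ===== PORT A =====
-- vector1[variable] / vector2[variable] raise KeyError when the key is absent: those inputs are
-- outside Pre_glued_py, where getD "" is exact.
def glued_py (vector1 : List (String × String)) (vector2 : List (String × String)) : Option (List (String × String)) :=
  let res :=
    (vector1.zip vector2).foldl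
      (fun (st : PySem.Dict String String × Int) p =>
        if (PySem.Dict.mk vector1).getD p.1.1 "" ≠ (PySem.Dict.mk vector2).getD p.1.1 "" then
          (st.1.insert p.1.1 "-", st.2 + 1)
        else
          (st.1.insert p.1.1 ((PySem.Dict.mk vector1).getD p.1.1 ""), st.2))
      (PySem.Dict.empty, 0)
  if res.2 = 1 then some res.1.items else none

-- ===== PORT B =====
-- Source B's inner 'go(i, seen)': structural recursion on keys[i:], aborting on a second difference
def pvGo (v1 v2 : List (String × String)) : List String → Bool → Option (List (String × String))
  | [], seen => if seen then some [] else none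
  | k :: ks, seen =>
    if (PySem.Dict.mk v1).getD k "" ≠ (PySem.Dict.mk v2).getD k "" then
      if seen then none
      else
        match pvGo v1 v2 ks true with
        | none => none
        | some rest => some ((k, "-") :: rest)
    else
      match pvGo v1 v2 ks seen with
      | none => none
      | some rest => some ((k, (PySem.Dict.mk v1).getD k "") :: rest)

def glued_py_alt (vector1 : List (String × String)) (vector2 : List (String × String)) : Option (List (String × String)) :=
  let keys := (vector1.zip vector2).map (fun p => p.1.1)
  match pvGo vector1 vector2 keys false with
  | none => none
  | some pairs => some ((PySem.Dict.ofList pairs).items)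

-- ===== PRECONDITION & SPEC =====
-- Pre_ excludes (a) association lists with duplicate keys, which do not represent a Python dict
-- (the arguments ARE dicts in Python), and (b) inputs where a zipped key of vector1 is absent from
-- vector2, on which A raises KeyError.
def Pre_glued_py (vector1 : List (String × String)) (vector2 : List (String × String)) : Prop :=
  (vector1.map (fun p => p.1)).Nodup ∧ (vector2.map (fun p => p.1)).Nodup ∧
  ∀ k ∈ (vector1.map (fun p => p.1)).take (min vector1.length vector2.length), k ∈ vector2.map (fun p => p.1)
instance (vector1 : List (String × String)) (vector2 : List (String × String)) : Decidable (Pre_glued_py vector1 vector2) := by unfold Pre_glued_py; infer_instance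
def pvWitness_glued_py : (List (String × String)) × (List (String × String)) :=
  ([("a", "x"), ("b", "y")], [("a", "x"), ("b", "z")])

def Spec_glued_py (vector1 : List (String × String)) (vector2 : List (String × String)) (out : Option (List (String × String))) : Prop := out = glued_py_alt vector1 vector2
instance (vector1 : List (String × String)) (vector2 : List (String × String)) (out : Option (List (String × String))) : Decidable (Spec_glued_py vector1 vector2 out) := by unfold Spec_glued_py; infer_instance

-- ===== CLAIM (what is proved, stated in full; the proofs are below) =====
def Claim_equal_glued_py : Prop := ∀ (vector1 : List (String × String)) (vector2 : List (String × String)), Dom_glued_py vector1 vector2 → Pre_glued_py vector1 vector2 → Spec_glued_py vector1 vector2 (glued_py vector1 vector2)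

-- ===== LEMMAS AND PROOFS =====

-- the value stored for key k in the merged vector
def pvVal (v1 v2 : List (String × String)) (k : String) : String :=
  if (PySem.Dict.mk v1).getD k "" ≠ (PySem.Dict.mk v2).getD k "" then "-"
  else (PySem.Dict.mk v1).getD k ""

-- zip(vector1, vector2) iterates the first min-length keys of vector1
lemma pv_zip_keys : ∀ (l1 : List (String × String)) (l2 : List (String × String)),
    (l1.zip l2).map (fun p => p.1.1) = (l1.map (fun p => p.1)).take (min l1.length l2.length) := by
  intro l1
  induction l1 with
  | nil => intro l2; simp
  | cons a t ih =>
    intro l2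
    cases l2 with
    | nil => simp
    | cons b t2 => simp [Nat.succ_min_succ, ih t2]

-- invariant of A's loop: fresh distinct keys append, the counter counts the differing keys
lemma pv_glued_fold (v1 v2 : List (String × String)) :
    ∀ (ps : List ((String × String) × (String × String))) (d : PySem.Dict String String) (c : Int),
    (ps.map (fun p => p.1.1)).Nodup →
    (∀ p ∈ ps, d.contains p.1.1 = false) →
    ps.foldl
      (fun (st : PySem.Dict String String × Int) p =>
        if (PySem.Dict.mk v1).getD p.1.1 "" ≠ (PySem.Dict.mk v2).getD p.1.1 "" then
          (st.1.insert p.1.1 "-", st.2 + 1)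
        else
          (st.1.insert p.1.1 ((PySem.Dict.mk v1).getD p.1.1 ""), st.2))
      (d, c)
    = (PySem.Dict.mk (d.items ++ ps.map (fun p => (p.1.1, pvVal v1 v2 p.1.1))),
       c + ((ps.filter (fun p => decide ((PySem.Dict.mk v1).getD p.1.1 "" ≠ (PySem.Dict.mk v2).getD p.1.1 ""))).length : Int)) := by
  intro ps
  induction ps with
  | nil => intro d c _ _; simp
  | cons p ps ih =>
    intro d c hnd hf
    have hdc : d.contains p.1.1 = false := hf p (by simp)
    have hne : ∀ q ∈ ps, q.1.1 ≠ p.1.1 := by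
      intro q hq h
      exact (List.nodup_cons.mp hnd).1 (List.mem_map.mpr ⟨q, hq, h⟩)
    have hfresh : ∀ v : String, ∀ q ∈ ps, (d.insert p.1.1 v).contains q.1.1 = false := by
      intro v q hq
      rw [PySem.Dict.contains_insert]
      simp [hne q hq, hf q (List.mem_cons_of_mem _ hq)]
    have hitems : ∀ v : String, (d.insert p.1.1 v).items = d.items ++ [(p.1.1, v)] :=
      fun v => PySem.Dict.items_insert_of_not_contains d v hdc
    by_cases h : (PySem.Dict.mk v1).getD p.1.1 "" ≠ (PySem.Dict.mk v2).getD p.1.1 ""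
    · simp only [List.foldl_cons, if_pos h]
      rw [ih (d.insert p.1.1 "-") (c + 1) (List.nodup_cons.mp hnd).2 (hfresh _)]
      rw [hitems]
      simp [pvVal, h]
      omega
    · simp only [List.foldl_cons, if_neg h]
      rw [ih (d.insert p.1.1 ((PySem.Dict.mk v1).getD p.1.1 "")) c (List.nodup_cons.mp hnd).2 (hfresh _)]
      rw [hitems]
      simp [pvVal, h]

-- characterisation of B's recursion: it returns the fully merged pair list iff the total number
-- of differences (including the one already seen) is exactly one
lemma pv_go_eq (v1 v2 : List (String × String)) (ks : List String) (seen : Bool) :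
    pvGo v1 v2 ks seen =
      if (ks.filter (fun k => decide ((PySem.Dict.mk v1).getD k "" ≠ (PySem.Dict.mk v2).getD k ""))).length
           + (if seen then 1 else 0) = 1 then
        some (ks.map (fun k => (k, pvVal v1 v2 k)))
      else none := by
  set q : String → Bool :=
    fun k => decide ((PySem.Dict.mk v1).getD k "" ≠ (PySem.Dict.mk v2).getD k "") with hq
  induction ks generalizing seen with
  | nil =>
    cases seen <;> simp [pvGo]
  | cons k ks ih =>
    rw [List.filter_cons]
    by_cases h : (PySem.Dict.mk v1).getD k "" ≠ (PySem.Dict.mk v2).getD k ""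
    · have hqk : q k = true := by rw [hq]; exact decide_eq_true h
      rw [hqk, if_pos rfl, List.length_cons]
      cases seen with
      | true =>
        have hl : pvGo v1 v2 (k :: ks) true = none := by simp [pvGo, h]
        rw [hl]
        simp only [if_true]
        rw [if_neg (by omega)]
      | false =>
        have hstep : pvGo v1 v2 (k :: ks) false
            = match pvGo v1 v2 ks true with
              | none => none
              | some rest => some ((k, "-") :: rest) := by
          simp [pvGo, h]
        rw [hstep, ih true]
        simp only [if_true, Bool.false_eq_true, if_false, Nat.add_zero]
        by_cases hz : (ks.filter q).length = 0
        · rw [if_pos (by omega), if_pos (by omega)]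
          simp [pvVal, h]
        · rw [if_neg (by omega), if_neg (by omega)]
    · have hqk : q k = false := by rw [hq]; exact decide_eq_false h
      rw [hqk]
      simp only [Bool.false_eq_true, if_false]
      have hstep : pvGo v1 v2 (k :: ks) seen
          = match pvGo v1 v2 ks seen with
            | none => none
            | some rest => some ((k, (PySem.Dict.mk v1).getD k "") :: rest) := by
        simp [pvGo, h]
      rw [hstep, ih seen]
      by_cases hc : (ks.filter q).length + (if seen then 1 else 0) = 1
      · rw [if_pos hc, if_pos hc]
        simp [pvVal, h]
      · rw [if_neg hc, if_neg hc]

-- OrderedDict(pairs) over distinct keys keeps the pairs as its items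
lemma pv_ofList_items (pairs : List (String × String)) (h : (pairs.map (fun p => p.1)).Nodup) :
    (PySem.Dict.ofList pairs).items = pairs := by
  have := PySem.Dict.items_foldl_insert_fresh (l := pairs) (k := fun p => p.1) (v := fun p => p.2)
    (d := PySem.Dict.empty) (by intro a _; simp [PySem.Dict.contains_empty]) h
  simpa using this

-- ===== VERDICT (by name: the statement is the Claim_ definition above) =====
theorem glued_py_spec : Claim_equal_glued_py := by
  intro v1 v2 _ hpre
  obtain ⟨h1, _, _⟩ := hpre
  unfold Spec_glued_py glued_py glued_py_alt
  have hks := pv_zip_keys v1 v2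
  have hnodupks : ((v1.zip v2).map (fun p => p.1.1)).Nodup := by
    rw [hks]; exact h1.sublist (List.take_sublist _ _)
  have hfold := pv_glued_fold v1 v2 (v1.zip v2) PySem.Dict.empty 0
    hnodupks (by intro p _; simp [PySem.Dict.contains_empty])
  rw [hfold]
  simp only [pv_go_eq, Bool.false_eq_true, if_false, Nat.add_zero]
  have hlen :
      ((v1.zip v2).filter (fun p => decide ((PySem.Dict.mk v1).getD p.1.1 "" ≠ (PySem.Dict.mk v2).getD p.1.1 ""))).length
      = (((v1.zip v2).map (fun p => p.1.1)).filter (fun k => decide ((PySem.Dict.mk v1).getD k "" ≠ (PySem.Dict.mk v2).getD k ""))).length := by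
    rw [List.filter_map]
    simp [Function.comp_def]
  by_cases hone :
      (((v1.zip v2).map (fun p => p.1.1)).filter (fun k => decide ((PySem.Dict.mk v1).getD k "" ≠ (PySem.Dict.mk v2).getD k ""))).length = 1
  · have hcondA :
        (0 : Int) + (((v1.zip v2).filter (fun p => decide ((PySem.Dict.mk v1).getD p.1.1 "" ≠ (PySem.Dict.mk v2).getD p.1.1 ""))).length : Int) = 1 := by
      rw [hlen, hone]; norm_num
    rw [if_pos hcondA, if_pos hone]
    simp only
    rw [pv_ofList_items _ (by rw [List.map_map]; simpa [Function.comp_def] using hnodupks)]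
    rw [List.map_map]
    exact congrArg some (by
      rw [show PySem.Dict.empty.items = ([] : List (String × String)) from rfl, List.nil_append]
      rfl)
  · have hcondA :
        ¬ ((0 : Int) + (((v1.zip v2).filter (fun p => decide ((PySem.Dict.mk v1).getD p.1.1 "" ≠ (PySem.Dict.mk v2).getD p.1.1 ""))).length : Int) = 1) := by
      rw [hlen]; omega
    rw [if_neg hcondA, if_neg hone]
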